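-- pv_equiv track=rewrite | github.com/HenriqueBBrum/Pre-filtering-Simulator | src/nids_parser/rules_parser.py | __get_options_as_list
-- ===== SOURCE A (Python) =====
-- def __get_options_as_list(rule):
--     options = "{}".format(rule.split('(', 1)[-1].lstrip().rstrip()) # Get everything after the first '('
--     if not options.endswith(")"):
--         raise Exception("Rule options is not closed properly, "
--                          "you have a syntax error")
--
--     op_list = list()
--     option, last_char = "", ""
--     for char in options.rstrip(")"):
--         if char != ";" or (char == ";" and last_char == "\\"):
--             option = option + char
--
--         if char == ";" and last_char != "\\":
--             op_list.append(option.strip())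
--             option = ""
--
--         last_char = char
--     return op_list
-- ===== SOURCE B (Python) =====
-- def __get_options_as_list(rule):
--     options = "{}".format(rule.split('(', 1)[-1].lstrip().rstrip())  # Get everything after the first '('
--     if not options.endswith(")"):
--         raise Exception("Rule options is not closed properly, "
--                         "you have a syntax error")
--
--     # split once on ';', then merge back the pieces whose ';' was escaped;
--     # the final piece (text after the last ';') is never emitted
--     op_list, cur = [], ""
--     parts = options.rstrip(")").split(";")
--     for p in parts[:-1]:
--         cur += p
--         if cur.endswith("\\"):
--             cur += ";"  # escaped semicolon stays inside the segment
--         else: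
--             op_list.append(cur.strip())
--             cur = ""
--     return op_list
-- ===== Notes on version B (the rewrite author's own statement) =====
-- stated objective: alternative
-- what changed: Replaces the char-by-char state machine (option/last_char accumulator) with a single split on ';' followed by a merge pass that glues back pieces whose ';' was escaped and drops the final piece.
import Mathlib
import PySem

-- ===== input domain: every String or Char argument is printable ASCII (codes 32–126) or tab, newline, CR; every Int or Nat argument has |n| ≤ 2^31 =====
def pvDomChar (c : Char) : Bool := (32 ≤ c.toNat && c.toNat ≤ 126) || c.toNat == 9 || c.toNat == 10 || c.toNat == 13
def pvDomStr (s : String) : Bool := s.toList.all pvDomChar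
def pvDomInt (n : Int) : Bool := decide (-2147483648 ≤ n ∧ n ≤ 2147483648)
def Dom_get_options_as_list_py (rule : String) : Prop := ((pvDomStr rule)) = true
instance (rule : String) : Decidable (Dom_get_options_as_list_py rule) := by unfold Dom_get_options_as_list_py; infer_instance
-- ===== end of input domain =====

-- B replaces A's char-by-char state machine by one split on ';' plus a merge pass; equal on all inputs where A returns (Pre_ = the closing-')' check A otherwise raises on).

-- ===== PORT A =====
-- the for-loop of A: state (op_list, option, last_char); strings handled as List Char
def goA : List Char → List String → List Char → List Char → List String
  | [], acc, _opt, _lc => acc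
  | c :: rest, acc, opt, lc =>
    let opt' := if c ≠ ';' ∨ (c = ';' ∧ lc = ['\\']) then opt ++ [c] else opt
    if c = ';' ∧ lc ≠ ['\\'] then goA rest (acc ++ [String.ofList (PySem.Chars.strip opt')]) [] [c]
    else goA rest acc opt' [c]

def get_options_as_list_py (rule : String) : List String :=
  let options := PySem.Str.rstrip (PySem.Str.lstrip (((PySem.Str.splitMax? rule "(" 1).getD [rule]).getLastD ""))
  -- options.rstrip(")"): drop trailing ')' chars (exact hand port of str.rstrip(chars))
  let body := (options.toList.reverse.dropWhile (fun c => c == ')')).reverse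
  goA body [] [] []

-- ===== PORT B =====
-- hand port of str.split(";") (single-char separator), exact
def pySplitSemi : List Char → List (List Char)
  | [] => [[]]
  | c :: cs =>
    if c = ';' then [] :: pySplitSemi cs
    else (c :: (pySplitSemi cs).headI) :: (pySplitSemi cs).tail

-- the merge loop of B over parts[:-1]
def goB : List (List Char) → List String → List Char → List String
  | [], acc, _cur => acc
  | p :: rest, acc, cur =>
    let cur' := cur ++ p
    if PySem.Chars.endswith cur' ['\\'] then goB rest acc (cur' ++ [';'])
    else goB rest (acc ++ [String.ofList (PySem.Chars.strip cur')]) []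

def get_options_as_list_py_alt (rule : String) : List String :=
  let options := PySem.Str.rstrip (PySem.Str.lstrip (((PySem.Str.splitMax? rule "(" 1).getD [rule]).getLastD ""))
  let body := (options.toList.reverse.dropWhile (fun c => c == ')')).reverse
  goB (pySplitSemi body).dropLast [] []

-- ===== PRECONDITION & SPEC =====
-- Pre_: the content after the first '(' ends (after whitespace stripping) with ')'; otherwise Python A raises Exception.
def Pre_get_options_as_list_py (rule : String) : Prop :=
  PySem.Str.endswith (PySem.Str.rstrip (PySem.Str.lstrip (((PySem.Str.splitMax? rule "(" 1).getD [rule]).getLastD ""))) ")" = true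
instance (rule : String) : Decidable (Pre_get_options_as_list_py rule) := by unfold Pre_get_options_as_list_py; infer_instance

def pvWitness_get_options_as_list_py : String := "alert ip any (msg:\"a\\;b\"; sid:1;)"

def Spec_get_options_as_list_py (rule : String) (out : List String) : Prop := out = get_options_as_list_py_alt rule
instance (rule : String) (out : List String) : Decidable (Spec_get_options_as_list_py rule out) := by unfold Spec_get_options_as_list_py; infer_instance

-- ===== CLAIM (what is proved, stated in full; the proofs are below) =====
def Claim_equal_get_options_as_list_py : Prop := ∀ (rule : String), Dom_get_options_as_list_py rule → Pre_get_options_as_list_py rule → Spec_get_options_as_list_py rule (get_options_as_list_py rule)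

-- ===== LEMMAS AND PROOFS =====
theorem pySplitSemi_ne_nil (cs : List Char) : pySplitSemi cs ≠ [] := by
  cases cs with
  | nil => simp [pySplitSemi]
  | cons c cs => simp only [pySplitSemi]; split <;> simp

theorem goB_shift (c : Char) (h : List Char) (t : List (List Char)) (acc : List String)
    (cur : List Char) : goB ((c :: h) :: t) acc cur = goB (h :: t) acc (cur ++ [c]) := by
  simp only [goB, List.append_assoc]
  rfl

theorem endswith_append_singleton (xs : List Char) (c d : Char) :
    PySem.Chars.endswith (xs ++ [c]) [d] = (c == d) := by
  by_cases hcd : c = d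
  · subst hcd
    rw [show (c == c) = true by simp, PySem.Chars.endswith_iff]
    exact ⟨xs, rfl⟩
  · rw [show (c == d) = false by simp [hcd]]
    refine Bool.eq_false_iff.mpr ?_
    rw [Ne, PySem.Chars.endswith_iff]
    rintro ⟨t, ht⟩
    have hlen : t.length = xs.length := by
      have := congrArg List.length ht
      simp at this
      omega
    have := List.append_inj_right ht hlen
    simp at this
    exact hcd this.symm

theorem goA_eq_goB (cs : List Char) : ∀ (acc : List String) (opt lc : List Char),
    ((lc = ['\\']) ↔ PySem.Chars.endswith opt ['\\'] = true) →
    goA cs acc opt lc = goB (pySplitSemi cs).dropLast acc opt := by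
  induction cs with
  | nil => intro acc opt lc _; simp [goA, pySplitSemi, goB]
  | cons c rest ih =>
    intro acc opt lc hinv
    by_cases hc : c = ';'
    · subst hc
      have hne := pySplitSemi_ne_nil rest
      obtain ⟨h, t, hht⟩ : ∃ h t, pySplitSemi rest = h :: t := by
        cases hrec : pySplitSemi rest with
        | nil => exact absurd hrec hne
        | cons a b => exact ⟨a, b, rfl⟩
      by_cases hesc : PySem.Chars.endswith opt ['\\'] = true
      · -- escaped ';': A keeps it in option, B keeps it in cur
        have hlc : lc = ['\\'] := hinv.mpr hesc
        rw [show pySplitSemi (';' :: rest) = [] :: pySplitSemi rest by simp [pySplitSemi]]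
        rw [hht, List.dropLast_cons_of_ne_nil (by simp), goB]
        simp only [List.append_nil, hesc, ← hht]
        rw [show goA (';' :: rest) acc opt lc =
              goA rest acc (opt ++ [';']) [';'] by
          simp [goA, hlc]]
        exact ih acc (opt ++ [';']) [';']
          (by rw [endswith_append_singleton]; simp)
      · -- unescaped ';': both emit the stripped segment
        have hlc : lc ≠ ['\\'] := fun h => hesc (hinv.mp h)
        rw [show pySplitSemi (';' :: rest) = [] :: pySplitSemi rest by simp [pySplitSemi]]
        rw [hht, List.dropLast_cons_of_ne_nil (by simp), goB]
        have hfalse : PySem.Chars.endswith opt ['\\'] = false := Bool.eq_false_iff.mpr hesc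
        simp only [List.append_nil, hfalse, Bool.false_eq_true, if_false, ← hht]
        rw [show goA (';' :: rest) acc opt lc =
              goA rest (acc ++ [String.ofList (PySem.Chars.strip opt)]) [] [';'] by
          simp [goA, hlc]]
        exact ih _ [] [';'] (by decide)
    · -- ordinary char: appended to the running segment on both sides
      have hstep : goA (c :: rest) acc opt lc = goA rest acc (opt ++ [c]) [c] := by
        simp [goA, hc]
      rw [hstep, ih acc (opt ++ [c]) [c]
        (by rw [endswith_append_singleton]; simp)]
      have hne := pySplitSemi_ne_nil rest
      obtain ⟨h, t, hht⟩ : ∃ h t, pySplitSemi rest = h :: t := by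
        cases hrec : pySplitSemi rest with
        | nil => exact absurd hrec hne
        | cons a b => exact ⟨a, b, rfl⟩
      rw [show pySplitSemi (c :: rest) = (c :: h) :: t by
            simp [pySplitSemi, hc, hht]]
      rw [hht]
      cases t with
      | nil => simp [goB]
      | cons t0 ts =>
        rw [show ((c :: h) :: t0 :: ts).dropLast = (c :: h) :: (t0 :: ts).dropLast from
              List.dropLast_cons_of_ne_nil (by simp),
            show (h :: t0 :: ts).dropLast = h :: (t0 :: ts).dropLast from
              List.dropLast_cons_of_ne_nil (by simp),
            goB_shift]

-- ===== VERDICT (by name: the statement is the Claim_ definition above) =====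
theorem get_options_as_list_py_spec : Claim_equal_get_options_as_list_py := by
  intro rule _ _
  unfold Spec_get_options_as_list_py get_options_as_list_py get_options_as_list_py_alt
  exact goA_eq_goB _ [] [] [] (by decide)
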